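-- pv_equiv track=rewrite | github.com/beatranche/lab-python-functions-extra | functions.py | f_count_case
-- ===== SOURCE A (Python) =====
-- def f_count_case(string):
--     """
--     Returns the number of uppercase and lowercase letters in the given string.
--
--     Parameters:
--     string (str): The string to count uppercase and lowercase letters in.
--
--     Returns:
--     A tuple containing the count of uppercase and lowercase letters in the string.
--     """
--     count_upper = 0
--     count_lower = 0
--
--     for character in string:
--         if character in string.upper():
--             count_upper += 1
--         elif character in string.lower():
--             count_lower += 1
--
--     tuple_count = ('Uppercase:', count_upper, 'Lowercase:', count_lower)
--
--     return tuple_count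
-- ===== SOURCE B (Python) =====
-- def f_count_case(string):
--     """
--     Returns the number of uppercase and lowercase letters in the given string.
--
--     Parameters:
--     string (str): The string to count uppercase and lowercase letters in.
--
--     Returns:
--     A tuple containing the count of uppercase and lowercase letters in the string.
--     """
--     up = set(string.upper())
--     low = set(string.lower())
--     counts = {}
--     for ch in string:
--         counts[ch] = counts.get(ch, 0) + 1
--     count_upper = sum(n for c, n in counts.items() if c in up)
--     count_lower = sum(n for c, n in counts.items() if c not in up and c in low)
--     return ('Uppercase:', count_upper, 'Lowercase:', count_lower)
-- ===== Notes on version B (the rewrite author's own statement) =====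
-- stated objective: faster
-- what changed: B builds a character-frequency dict and the upper/lower character sets once, then computes each count as a filtered sum over the distinct (char, count) items, instead of A's per-character substring search of string.upper()/string.lower() inside an accumulator loop.
import Mathlib
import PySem

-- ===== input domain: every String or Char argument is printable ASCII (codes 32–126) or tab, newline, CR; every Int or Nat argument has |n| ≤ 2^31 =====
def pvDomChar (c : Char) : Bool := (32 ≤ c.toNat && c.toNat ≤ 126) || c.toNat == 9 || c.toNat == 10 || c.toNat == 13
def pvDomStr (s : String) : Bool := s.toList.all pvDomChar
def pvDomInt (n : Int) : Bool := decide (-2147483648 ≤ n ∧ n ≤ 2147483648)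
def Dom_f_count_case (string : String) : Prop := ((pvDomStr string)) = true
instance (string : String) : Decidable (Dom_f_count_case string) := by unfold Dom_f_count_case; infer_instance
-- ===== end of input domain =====

-- B builds a character-frequency dict and the upper/lower character sets once, then computes each count
-- as a filtered sum over the distinct (char, count) items, replacing A's per-character substring scan (faster).

-- ===== PORT A =====
def f_count_case (string : String) : String × Int × String × Int :=
  let cs := string.toList
  let up := PySem.Chars.upper cs
  let lo := PySem.Chars.lower cs
  let p := cs.foldl (fun (acc : Int × Int) c =>
      if c ∈ up then (acc.1 + 1, acc.2)
      else if c ∈ lo then (acc.1, acc.2 + 1)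
      else acc) (0, 0)
  ("Uppercase:", p.1, "Lowercase:", p.2)

-- ===== PORT B =====
def f_count_case_alt (string : String) : String × Int × String × Int :=
  let cs := string.toList
  let up : PySem.Set Char := PySem.Set.ofList (PySem.Chars.upper cs)
  let lo : PySem.Set Char := PySem.Set.ofList (PySem.Chars.lower cs)
  let counts : PySem.Dict Char Int :=
    cs.foldl (fun d ch => d.insert ch (d.getD ch 0 + 1)) PySem.Dict.empty
  let count_upper := ((counts.items.filter (fun kn => decide (kn.1 ∈ up))).map Prod.snd).sum
  let count_lower := ((counts.items.filter (fun kn => decide (kn.1 ∉ up ∧ kn.1 ∈ lo))).map Prod.snd).sum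
  ("Uppercase:", count_upper, "Lowercase:", count_lower)

-- ===== PRECONDITION & SPEC =====
def Spec_f_count_case (string : String) (out : String × Int × String × Int) : Prop := out = f_count_case_alt string
instance (string : String) (out : String × Int × String × Int) : Decidable (Spec_f_count_case string out) := by unfold Spec_f_count_case; infer_instance

-- ===== CLAIM =====
def Claim_equal_f_count_case : Prop := ∀ (string : String), Dom_f_count_case string → Spec_f_count_case string (f_count_case string)

-- ===== LEMMAS AND PROOFS =====

-- the sum of the second components of the p-filtered (k, f k) pairs is the sum of the guarded values
lemma pv_sum_filter_eq_sum_if (p : Char → Bool) (f : Char → Int) (d : List Char) :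
    (((d.map (fun k => (k, f k))).filter (fun kn => p kn.1)).map Prod.snd).sum
      = (d.map (fun k => if p k then f k else 0)).sum := by
  induction d with
  | nil => simp
  | cons a d ih =>
    simp only [List.map_cons, List.filter_cons]
    by_cases hp : p a <;> simp [hp, ih]

-- sum over a nodup list of the 0/1 indicator "p k and k = c" is the membership indicator at c
lemma pv_sum_indicator (p : Char → Bool) (c : Char) (d : List Char) (hd : d.Nodup) :
    (d.map (fun k => if p k && (k == c) then (1 : Int) else 0)).sum
      = if p c && decide (c ∈ d) then 1 else 0 := by
  induction d with
  | nil => simp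
  | cons a d ih =>
    rw [List.nodup_cons] at hd
    simp only [List.map_cons, List.sum_cons, ih hd.2]
    by_cases hac : a = c
    · subst hac
      simp [hd.1]
    · simp [hac, Ne.symm hac, beq_iff_eq]

-- the grouped (per-distinct-character, count-weighted) sum equals the direct countP
lemma pv_sum_if_count (p : Char → Bool) (cs d : List Char) (hd : d.Nodup)
    (hmem : ∀ c ∈ cs, c ∈ d) :
    (d.map (fun k => if p k then ((cs.count k : Nat) : Int) else 0)).sum
      = (cs.countP p : Int) := by
  induction cs with
  | nil => simp
  | cons c cs ih =>
    have hmem' : ∀ x ∈ cs, x ∈ d := fun x hx => hmem x (List.mem_cons_of_mem _ hx)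
    have hstep : ∀ k ∈ d,
        (if p k then (((c :: cs).count k : Nat) : Int) else 0)
          = (if p k then ((cs.count k : Nat) : Int) else 0)
            + (if p k && (k == c) then 1 else 0) := by
      intro k _
      by_cases hp : p k
      · by_cases hkc : k = c
        · subst hkc; simp [hp, List.count_cons_self]
        · simp [hp, hkc, Ne.symm hkc]
      · simp [hp]
    rw [List.map_congr_left hstep, PySem.List.sum_map_add_int, ih hmem',
        pv_sum_indicator p c d hd]
    have hc : c ∈ d := hmem c (List.mem_cons_self ..)
    by_cases hp : p c <;> simp [hp, hc]

-- ===== VERDICT =====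
theorem f_count_case_spec : Claim_equal_f_count_case := by
  intro s _
  unfold Spec_f_count_case f_count_case f_count_case_alt
  simp only []
  set cs := s.toList with hcs
  set U := PySem.Chars.upper cs with hU
  set L := PySem.Chars.lower cs with hL
  -- A side: split the pair loop into two counting loops
  rw [show (fun (acc : Int × Int) c =>
        if c ∈ U then (acc.1 + 1, acc.2)
        else if c ∈ L then (acc.1, acc.2 + 1)
        else acc)
      = (fun (acc : Int × Int) c =>
        (if c ∈ U then acc.1 + 1 else acc.1,
         if (c ∉ U ∧ c ∈ L) then acc.2 + 1 else acc.2)) from by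
      funext acc c; by_cases h1 : c ∈ U <;> by_cases h2 : c ∈ L <;> simp [h1, h2]]
  rw [PySem.List.foldl_prod_mk
        (f := fun (u : Int) (c : Char) => if c ∈ U then u + 1 else u)
        (g := fun (l : Int) (c : Char) => if (c ∉ U ∧ c ∈ L) then l + 1 else l)]
  rw [PySem.List.foldl_ite_add_one (fun c => c ∈ U)]
  rw [PySem.List.foldl_ite_add_one (fun c => c ∉ U ∧ c ∈ L)]
  -- B side: the dict is the counter of cs; its items are the distinct chars with their counts
  rw [PySem.Dict.foldl_insert_getD_add_one_eq_counter, PySem.Dict.items_counter]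
  have hnd : (PySem.Set.ofList cs).Nodup := PySem.Set.nodup_ofList cs
  have hm : ∀ c ∈ cs, c ∈ PySem.Set.ofList cs := by
    intro c hc; exact (PySem.Set.mem_ofList ..).2 hc
  rw [pv_sum_filter_eq_sum_if (fun k => decide (k ∈ PySem.Set.ofList U))
        (fun k => ((cs.count k : Nat) : Int)) (PySem.Set.ofList cs)]
  rw [pv_sum_filter_eq_sum_if (fun k => decide (k ∉ PySem.Set.ofList U ∧ k ∈ PySem.Set.ofList L))
        (fun k => ((cs.count k : Nat) : Int)) (PySem.Set.ofList cs)]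
  have hsetU : ∀ k : Char, (k ∈ PySem.Set.ofList U) ↔ k ∈ U := fun k => PySem.Set.mem_ofList ..
  have hsetL : ∀ k : Char, (k ∈ PySem.Set.ofList L) ↔ k ∈ L := fun k => PySem.Set.mem_ofList ..
  have e1 : (List.map (fun k => if decide (k ∈ PySem.Set.ofList U) then ((cs.count k : Nat) : Int) else 0)
        (PySem.Set.ofList cs))
      = (List.map (fun k => if decide (k ∈ U) then ((cs.count k : Nat) : Int) else 0)
        (PySem.Set.ofList cs)) := by
    apply List.map_congr_left; intro k _; simp [hsetU k]
  have e2 : (List.map (fun k => if decide (k ∉ PySem.Set.ofList U ∧ k ∈ PySem.Set.ofList L) then ((cs.count k : Nat) : Int) else 0)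
        (PySem.Set.ofList cs))
      = (List.map (fun k => if decide (k ∉ U ∧ k ∈ L) then ((cs.count k : Nat) : Int) else 0)
        (PySem.Set.ofList cs)) := by
    apply List.map_congr_left; intro k _; simp [hsetU k, hsetL k]
  rw [e1, e2,
      pv_sum_if_count (fun k => decide (k ∈ U)) cs _ hnd hm,
      pv_sum_if_count (fun k => decide (k ∉ U ∧ k ∈ L)) cs _ hnd hm]
  simp
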